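-- pv_equiv track=rewrite | github.com/Haaae/Algorithm-Coding-Test | implementation/문자열_압축_프로그래머스.py | press
-- ===== SOURCE A (Python) =====
-- def press(s, length):
--     count = 1
--     last_str = s[0:length]
--     new_s = ''
--     for i in range(1, len(s) // length + 1):
--         if (i * length) + length > len(s):
--             now_str = s[i * length:]
--         else:
--             now_str = s[i * length:(i * length) + length]
--         if now_str == last_str:
--             count += 1
--             continue
--
--         if count > 1:
--             new_s += str(count) + last_str
--
--         if count <= 1:
--             new_s += last_str
--         count = 1
--         last_str = now_str
--
--     if count > 1:
--         new_s += str(count) + last_str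
--
--     if count <= 1:
--         new_s += last_str
--
--     return new_s
-- ===== SOURCE B (Python) =====
-- def press(s, length):
--     n = len(s)
--     chunks = [s[0:length]] + [
--         (s[i * length:] if i * length + length > n else s[i * length:i * length + length])
--         for i in range(1, n // length + 1)
--     ]
--     out = []
--     rest = chunks
--     while rest:
--         c = rest[0]
--         k = 1
--         while k < len(rest) and rest[k] == c:
--             k += 1
--         out.append((str(k) if k > 1 else '') + c)
--         rest = rest[k:]
--     return ''.join(out)
-- ===== Notes on version B (the rewrite author's own statement) =====
-- stated objective: alternative
-- what changed: B separates the work into two phases: first it materialises the list of fixed-length chunks with a comprehension, then it run-length encodes that list by finding each run's extent and jumping past it, instead of A's single streaming loop with count/last_str accumulator state.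
import Mathlib
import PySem

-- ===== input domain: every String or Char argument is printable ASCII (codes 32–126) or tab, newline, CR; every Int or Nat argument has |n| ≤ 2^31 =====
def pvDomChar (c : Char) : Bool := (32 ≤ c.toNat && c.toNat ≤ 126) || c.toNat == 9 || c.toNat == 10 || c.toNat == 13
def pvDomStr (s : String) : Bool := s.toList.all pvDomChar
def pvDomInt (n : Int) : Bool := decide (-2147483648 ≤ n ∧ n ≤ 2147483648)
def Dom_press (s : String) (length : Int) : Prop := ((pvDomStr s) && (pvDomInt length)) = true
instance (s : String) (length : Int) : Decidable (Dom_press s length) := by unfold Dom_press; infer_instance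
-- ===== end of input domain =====

-- B differs from A by a two-phase decomposition (materialise the chunk list, then run-length encode it by runs); no speed claim.

-- ===== PORT A =====
def press (s : String) (length : Int) : String :=
  let cs := s.toList
  let n : Int := cs.length
  let st :=
    (PySem.List.pyRange 1 (PySem.Int.floordiv n length + 1) 1).foldl
      (fun (st : Int × List Char × List Char) i =>
        let count := st.1
        let last_str := st.2.1
        let new_s := st.2.2
        let now_str :=
          if i * length + length > n then PySem.List.slice cs (some (i * length)) none
          else PySem.List.slice cs (some (i * length)) (some (i * length + length))
        if now_str == last_str then (count + 1, last_str, new_s)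
        else
          let new_s := if count > 1 then new_s ++ PySem.Int.toChars count ++ last_str else new_s
          let new_s := if count ≤ 1 then new_s ++ last_str else new_s
          (1, now_str, new_s))
      (1, PySem.List.slice cs (some 0) (some length), [])
  let count := st.1
  let last_str := st.2.1
  let new_s := st.2.2
  let new_s := if count > 1 then new_s ++ PySem.Int.toChars count ++ last_str else new_s
  let new_s := if count ≤ 1 then new_s ++ last_str else new_s
  String.ofList new_s

-- ===== PORT B =====
-- inner while loop of Source B: number of leading elements of the rest equal to c
def countLead (c : List Char) : List (List Char) → Nat
  | [] => 0
  | x :: tl => if x == c then 1 + countLead c tl else 0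

-- outer while loop of Source B: emit one run, jump past it (rest = rest[k:])
def rleLoop : List (List Char) → List Char
  | [] => []
  | c :: tl =>
    let k := 1 + countLead c tl
    ((if 1 < k then PySem.Int.toChars (k : Int) else []) ++ c) ++ rleLoop ((c :: tl).drop k)
termination_by l => l.length
decreasing_by simp

def press_alt (s : String) (length : Int) : String :=
  let cs := s.toList
  let n : Int := cs.length
  let chunks :=
    PySem.List.slice cs (some 0) (some length) ::
      (PySem.List.pyRange 1 (PySem.Int.floordiv n length + 1) 1).map
        (fun i =>
          if i * length + length > n then PySem.List.slice cs (some (i * length)) none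
          else PySem.List.slice cs (some (i * length)) (some (i * length + length)))
  String.ofList (rleLoop chunks)

-- ===== PRECONDITION & SPEC =====
-- Pre_ excludes exactly length = 0, where the Python A raises ZeroDivisionError (len(s) // length).
def Pre_press (s : String) (length : Int) : Prop := length ≠ 0
instance (s : String) (length : Int) : Decidable (Pre_press s length) := by unfold Pre_press; infer_instance
def pvWitness_press : String × Int := ("aabbaccc", 2)

def Spec_press (s : String) (length : Int) (out : String) : Prop := out = press_alt s length
instance (s : String) (length : Int) (out : String) : Decidable (Spec_press s length out) := by unfold Spec_press; infer_instance

-- ===== CLAIM (what is proved, stated in full; the proofs are below) =====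
def Claim_equal_press : Prop := ∀ (s : String) (length : Int), Dom_press s length → Pre_press s length → Spec_press s length (press s length)

-- ===== LEMMAS AND PROOFS =====
def emitRun (count : Int) (c : List Char) : List Char :=
  (if 1 < count then PySem.Int.toChars count else []) ++ c

lemma rleLoop_cons (c : List Char) (tl : List (List Char)) :
    rleLoop (c :: tl) =
      emitRun (1 + (countLead c tl : Int)) c ++ rleLoop (tl.drop (countLead c tl)) := by
  rw [rleLoop.eq_def, emitRun]
  simp only []
  have hd : (c :: tl).drop (1 + countLead c tl) = tl.drop (countLead c tl) := by
    rw [Nat.add_comm]; exact List.drop_succ_cons ..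
  rw [hd]
  cases h : countLead c tl with
  | zero => simp
  | succ m =>
    simp only [Nat.lt_add_right_iff_pos, Nat.succ_pos, if_pos]
    have : ((1 + (m + 1) : Nat) : Int) = 1 + ((m : Int) + 1) := by push_cast; ring
    rw [this]
    have hcond : (1 : Int) < 1 + ((m + 1 : Nat) : Int) := by push_cast; omega
    rw [if_pos hcond]
    push_cast
    ring_nf

-- generic step of A's loop, expressed on the chunk value
def stepA (st : Int × List Char × List Char) (now : List Char) : Int × List Char × List Char :=
  if now == st.2.1 then (st.1 + 1, st.2.1, st.2.2)
  else (1, now, st.2.2 ++ emitRun st.1 st.2.1)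

lemma twoIf_eq_emit (count : Int) (last new : List Char) :
    (if count ≤ 1 then (if count > 1 then new ++ PySem.Int.toChars count ++ last else new) ++ last
     else (if count > 1 then new ++ PySem.Int.toChars count ++ last else new)) = new ++ emitRun count last := by
  by_cases h : 1 < count
  · simp [emitRun, h, show ¬ count ≤ 1 by omega, List.append_assoc]
  · simp [emitRun, h, show count ≤ 1 by omega]

lemma loop_encode (L : List (List Char)) :
    ∀ (count : Int) (c acc : List Char),
      (L.foldl stepA (count, c, acc)).2.2 ++
          emitRun (L.foldl stepA (count, c, acc)).1 (L.foldl stepA (count, c, acc)).2.1 =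
        acc ++ emitRun (count + (countLead c L : Int)) c ++ rleLoop (L.drop (countLead c L)) := by
  induction L with
  | nil => intro count c acc; simp [countLead, rleLoop]
  | cons x tl ih =>
    intro count c acc
    by_cases hx : x == c
    · have hxc : x = c := by exact beq_iff_eq.mp hx
      subst hxc
      rw [List.foldl_cons]
      rw [show stepA (count, x, acc) x = (count + 1, x, acc) by simp [stepA]]
      rw [ih (count + 1) x acc]
      rw [show countLead x (x :: tl) = 1 + countLead x tl by simp [countLead]]
      rw [show (x :: tl).drop (1 + countLead x tl) = tl.drop (countLead x tl) by
        rw [Nat.add_comm]; exact List.drop_succ_cons ..]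
      congr 3
      push_cast; ring
    · rw [List.foldl_cons]
      rw [show stepA (count, c, acc) x = (1, x, acc ++ emitRun count c) by simp [stepA, hx]]
      rw [ih 1 x (acc ++ emitRun count c)]
      rw [show countLead c (x :: tl) = 0 by simp [countLead, hx]]
      rw [List.drop_zero, rleLoop_cons]
      simp [List.append_assoc]

-- ===== VERDICT (by name: the statement is the Claim_ definition above) =====
theorem press_spec : Claim_equal_press := by
  intro s length _ _
  unfold Spec_press press press_alt
  have hb : ∀ (st : Int × List Char × List Char) (i : Int),
      (let count := st.1
       let last_str := st.2.1
       let new_s := st.2.2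
       let now_str :=
         if i * length + length > (s.toList.length : Int) then PySem.List.slice s.toList (some (i * length)) none
         else PySem.List.slice s.toList (some (i * length)) (some (i * length + length))
       if now_str == last_str then (count + 1, last_str, new_s)
       else
         let new_s := if count > 1 then new_s ++ PySem.Int.toChars count ++ last_str else new_s
         let new_s := if count ≤ 1 then new_s ++ last_str else new_s
         (1, now_str, new_s)) =
      stepA st
        (if i * length + length > (s.toList.length : Int) then PySem.List.slice s.toList (some (i * length)) none
         else PySem.List.slice s.toList (some (i * length)) (some (i * length + length))) := by
    intro st i
    simp only [stepA]
    by_cases h : (if i * length + length > (s.toList.length : Int) then PySem.List.slice s.toList (some (i * length)) none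
         else PySem.List.slice s.toList (some (i * length)) (some (i * length + length))) == st.2.1
    · simp only [h, if_pos]
    · simp only [h, if_neg, Bool.false_eq_true, not_false_iff, twoIf_eq_emit]
  simp only [hb]
  rw [← List.foldl_map]
  rw [twoIf_eq_emit]
  rw [loop_encode]
  rw [rleLoop_cons]
  simp
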